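-- pv_equiv track=rewrite | github.com/iceXshadow/prep | commit_message_generator.py | analyze_diff_content
-- ===== SOURCE A (Python) =====
-- from typing import List, Dict, Tuple
--
-- def analyze_diff_content(diff: str) -> Dict[str, int]:
--     """Analyze the content of the diff."""
--     analysis = {
--         'additions': 0,
--         'deletions': 0,
--         'function_additions': 0,
--         'class_additions': 0,
--         'import_changes': 0,
--         'comment_changes': 0,
--         'test_changes': 0
--     }
--
--     lines = diff.split('\n')
--     for line in lines:
--         if line.startswith('+') and not line.startswith('+++'):
--             analysis['additions'] += 1
--             line_content = line[1:].strip().lower()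
--
--             # Check for function definitions
--             if line_content.startswith('def ') or 'function' in line_content:
--                 analysis['function_additions'] += 1
--
--             # Check for class definitions
--             if line_content.startswith('class '):
--                 analysis['class_additions'] += 1
--
--             # Check for imports
--             if line_content.startswith('import ') or line_content.startswith('from '):
--                 analysis['import_changes'] += 1
--
--             # Check for comments
--             if line_content.startswith('#') or line_content.startswith('//') or line_content.startswith('/*'):
--                 analysis['comment_changes'] += 1
--
--             # Check for test-related content
--             if 'test' in line_content or 'assert' in line_content:
--                 analysis['test_changes'] += 1
--
--         elif line.startswith('-') and not line.startswith('---'):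
--             analysis['deletions'] += 1
--
--     return analysis
-- ===== SOURCE B (Python) =====
-- def analyze_diff_content(diff: str):
--     """Analyze the content of the diff: filter/normalize added lines once, then
--     compute each category as an independent aggregation pass."""
--     lines = diff.split('\n')
--     added = [l[1:].strip().lower()
--              for l in lines if l.startswith('+') and not l.startswith('+++')]
--     return {
--         'additions': len(added),
--         'deletions': sum(1 for l in lines
--                          if l.startswith('-') and not l.startswith('---')),
--         'function_additions': sum(1 for c in added
--                                   if c.startswith('def ') or 'function' in c),
--         'class_additions': sum(1 for c in added if c.startswith('class ')),
--         'import_changes': sum(1 for c in added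
--                               if c.startswith('import ') or c.startswith('from ')),
--         'comment_changes': sum(1 for c in added
--                                if c.startswith('#') or c.startswith('//') or c.startswith('/*')),
--         'test_changes': sum(1 for c in added if 'test' in c or 'assert' in c),
--     }
-- ===== Notes on version B (the rewrite author's own statement) =====
-- stated objective: alternative
-- what changed: The single fused loop that interleaves all seven counters in one dict is replaced by building the normalized added-line list once and computing each count as its own independent pass (filter-then-multiple-aggregations).
import Mathlib
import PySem

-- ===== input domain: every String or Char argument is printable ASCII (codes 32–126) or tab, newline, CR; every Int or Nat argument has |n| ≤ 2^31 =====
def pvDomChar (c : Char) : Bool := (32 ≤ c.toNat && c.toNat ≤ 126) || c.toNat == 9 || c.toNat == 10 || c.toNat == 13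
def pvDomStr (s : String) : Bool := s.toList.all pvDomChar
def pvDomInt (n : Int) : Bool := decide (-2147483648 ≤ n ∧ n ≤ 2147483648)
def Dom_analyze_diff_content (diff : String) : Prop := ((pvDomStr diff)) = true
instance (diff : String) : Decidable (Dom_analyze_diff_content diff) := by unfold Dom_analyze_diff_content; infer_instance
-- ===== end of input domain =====

-- B replaces A's single fused counting loop over a dict by one filter/normalize pass building
-- the added-line list, then seven independent aggregation passes (objective: alternative).

-- shared line predicates (the same textual conditions both Pythons test)
def pvIsAdd (l : String) : Bool := PySem.Str.startswith l "+" && !PySem.Str.startswith l "+++"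
def pvIsDel (l : String) : Bool := PySem.Str.startswith l "-" && !PySem.Str.startswith l "---"
def pvNorm (l : String) : String := PySem.Str.lower (PySem.Str.strip (PySem.Str.slice l (some 1) none))
def pvIsFun (c : String) : Bool := PySem.Str.startswith c "def " || PySem.Str.isIn "function" c
def pvIsClass (c : String) : Bool := PySem.Str.startswith c "class "
def pvIsImport (c : String) : Bool := PySem.Str.startswith c "import " || PySem.Str.startswith c "from "
def pvIsComment (c : String) : Bool := PySem.Str.startswith c "#" || PySem.Str.startswith c "//" || PySem.Str.startswith c "/*"
def pvIsTest (c : String) : Bool := PySem.Str.isIn "test" c || PySem.Str.isIn "assert" c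

-- ===== PORT A =====
-- A's loop body: one line updates the seven counters of the dict in place
def pvStepA (d : PySem.Dict String Int) (line : String) : PySem.Dict String Int :=
  if pvIsAdd line then
    let d := d.modify "additions" 0 (· + 1)
    let line_content := pvNorm line
    let d := if pvIsFun line_content then d.modify "function_additions" 0 (· + 1) else d
    let d := if pvIsClass line_content then d.modify "class_additions" 0 (· + 1) else d
    let d := if pvIsImport line_content then d.modify "import_changes" 0 (· + 1) else d
    let d := if pvIsComment line_content then d.modify "comment_changes" 0 (· + 1) else d
    let d := if pvIsTest line_content then d.modify "test_changes" 0 (· + 1) else d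
    d
  else if pvIsDel line then d.modify "deletions" 0 (· + 1)
  else d

def analyze_diff_content (diff : String) : List (String × Int) :=
  let analysis : PySem.Dict String Int :=
    PySem.Dict.ofList [("additions",0),("deletions",0),("function_additions",0),
      ("class_additions",0),("import_changes",0),("comment_changes",0),("test_changes",0)]
  let lines := (PySem.Str.split? diff "\n").getD []   -- sep "\n" ≠ "", so split? is always some
  (lines.foldl pvStepA analysis).items

-- ===== PORT B =====
def analyze_diff_content_alt (diff : String) : List (String × Int) :=
  let lines := (PySem.Str.split? diff "\n").getD []   -- sep "\n" ≠ "", so split? is always some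
  let added := (lines.filter pvIsAdd).map pvNorm
  [("additions", (added.length : Int)),
   ("deletions", ((lines.countP pvIsDel : Nat) : Int)),
   ("function_additions", ((added.countP pvIsFun : Nat) : Int)),
   ("class_additions", ((added.countP pvIsClass : Nat) : Int)),
   ("import_changes", ((added.countP pvIsImport : Nat) : Int)),
   ("comment_changes", ((added.countP pvIsComment : Nat) : Int)),
   ("test_changes", ((added.countP pvIsTest : Nat) : Int))]

-- ===== PRECONDITION & SPEC =====
def Spec_analyze_diff_content (diff : String) (out : List (String × Int)) : Prop := out = analyze_diff_content_alt diff
instance (diff : String) (out : List (String × Int)) : Decidable (Spec_analyze_diff_content diff out) := by unfold Spec_analyze_diff_content; infer_instance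

-- ===== CLAIM (what is proved, stated in full; the proofs are below) =====
def Claim_equal_analyze_diff_content : Prop := ∀ (diff : String), Dom_analyze_diff_content diff → Spec_analyze_diff_content diff (analyze_diff_content diff)

-- ===== LEMMAS AND PROOFS =====
def mkD (a b c d e f g : Int) : PySem.Dict String Int :=
  PySem.Dict.ofList [("additions",a),("deletions",b),("function_additions",c),
    ("class_additions",d),("import_changes",e),("comment_changes",f),("test_changes",g)]

lemma items_mkD (a b c d e f g : Int) :
    (mkD a b c d e f g).items = [("additions",a),("deletions",b),("function_additions",c),
      ("class_additions",d),("import_changes",e),("comment_changes",f),("test_changes",g)] := rfl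

lemma mkD_add (a b c d e f g : Int) :
    (mkD a b c d e f g).modify "additions" 0 (· + 1) = mkD (a+1) b c d e f g := rfl
lemma mkD_del (a b c d e f g : Int) :
    (mkD a b c d e f g).modify "deletions" 0 (· + 1) = mkD a (b+1) c d e f g := rfl
lemma mkD_fun (a b c d e f g : Int) :
    (mkD a b c d e f g).modify "function_additions" 0 (· + 1) = mkD a b (c+1) d e f g := rfl
lemma mkD_class (a b c d e f g : Int) :
    (mkD a b c d e f g).modify "class_additions" 0 (· + 1) = mkD a b c (d+1) e f g := rfl
lemma mkD_import (a b c d e f g : Int) :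
    (mkD a b c d e f g).modify "import_changes" 0 (· + 1) = mkD a b c d (e+1) f g := rfl
lemma mkD_comment (a b c d e f g : Int) :
    (mkD a b c d e f g).modify "comment_changes" 0 (· + 1) = mkD a b c d e (f+1) g := rfl
lemma mkD_test (a b c d e f g : Int) :
    (mkD a b c d e f g).modify "test_changes" 0 (· + 1) = mkD a b c d e f (g+1) := rfl

lemma ite_mod_fun (p : Bool) (a b c d e f g : Int) :
    (if p then (mkD a b c d e f g).modify "function_additions" 0 (· + 1) else mkD a b c d e f g)
      = mkD a b (c + if p then 1 else 0) d e f g := by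
  cases p
  · simp
  · simp only [if_true, mkD_fun]
lemma ite_mod_class (p : Bool) (a b c d e f g : Int) :
    (if p then (mkD a b c d e f g).modify "class_additions" 0 (· + 1) else mkD a b c d e f g)
      = mkD a b c (d + if p then 1 else 0) e f g := by
  cases p
  · simp
  · simp only [if_true, mkD_class]
lemma ite_mod_import (p : Bool) (a b c d e f g : Int) :
    (if p then (mkD a b c d e f g).modify "import_changes" 0 (· + 1) else mkD a b c d e f g)
      = mkD a b c d (e + if p then 1 else 0) f g := by
  cases p
  · simp
  · simp only [if_true, mkD_import]
lemma ite_mod_comment (p : Bool) (a b c d e f g : Int) :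
    (if p then (mkD a b c d e f g).modify "comment_changes" 0 (· + 1) else mkD a b c d e f g)
      = mkD a b c d e (f + if p then 1 else 0) g := by
  cases p
  · simp
  · simp only [if_true, mkD_comment]
lemma ite_mod_test (p : Bool) (a b c d e f g : Int) :
    (if p then (mkD a b c d e f g).modify "test_changes" 0 (· + 1) else mkD a b c d e f g)
      = mkD a b c d e f (g + if p then 1 else 0) := by
  cases p
  · simp
  · simp only [if_true, mkD_test]

lemma mkD_congr {a b c d e f g a' b' c' d' e' f' g' : Int}
    (ha : a = a') (hb : b = b') (hc : c = c') (hd : d = d')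
    (he : e = e') (hf : f = f') (hg : g = g') :
    mkD a b c d e f g = mkD a' b' c' d' e' f' g' := by
  rw [ha, hb, hc, hd, he, hf, hg]

-- a '+' line never starts with '-'
lemma not_del_of_add (l : String) (h : pvIsAdd l = true) : pvIsDel l = false := by
  simp only [pvIsAdd, Bool.and_eq_true] at h
  have hp : ("+".toList) <+: l.toList := by
    have := h.1
    simp only [PySem.Str.startswith_eq] at this
    exact (PySem.Chars.startswith_iff _ _).mp this
  rcases hp with ⟨t1, e1⟩
  have hne : ¬ (("-".toList) <+: l.toList) := by
    rintro ⟨t2, e2⟩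
    rw [← e1] at e2
    simp at e2
  have hs : PySem.Chars.startswith l.toList ['-'] = false := by
    cases hb : PySem.Chars.startswith l.toList ['-']
    · rfl
    · refine absurd ?_ hne
      have := (PySem.Chars.startswith_iff _ _).mp hb
      simpa using this
  simp [pvIsDel, hs]

set_option maxHeartbeats 1000000 in
lemma stepA_mkD (l : String) (a b c d e f g : Int) :
    pvStepA (mkD a b c d e f g) l =
    if pvIsAdd l then
      mkD (a+1) b (c + if pvIsFun (pvNorm l) then 1 else 0)
        (d + if pvIsClass (pvNorm l) then 1 else 0)
        (e + if pvIsImport (pvNorm l) then 1 else 0)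
        (f + if pvIsComment (pvNorm l) then 1 else 0)
        (g + if pvIsTest (pvNorm l) then 1 else 0)
    else if pvIsDel l then mkD a (b+1) c d e f g
    else mkD a b c d e f g := by
  by_cases h1 : pvIsAdd l
  · simp only [pvStepA, h1, if_true, mkD_add, ite_mod_fun, ite_mod_class, ite_mod_import,
      ite_mod_comment, ite_mod_test]
  · by_cases h2 : pvIsDel l <;>
      simp only [pvStepA, h1, h2, if_true, if_false, Bool.false_eq_true, mkD_del]

lemma foldl_stepA (ls : List String) : ∀ (a b c d e f g : Int),
    ls.foldl pvStepA (mkD a b c d e f g) =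
    mkD (a + ((ls.filter pvIsAdd).length : Int))
        (b + ((ls.countP pvIsDel : Nat) : Int))
        (c + ((((ls.filter pvIsAdd).map pvNorm).countP pvIsFun : Nat) : Int))
        (d + ((((ls.filter pvIsAdd).map pvNorm).countP pvIsClass : Nat) : Int))
        (e + ((((ls.filter pvIsAdd).map pvNorm).countP pvIsImport : Nat) : Int))
        (f + ((((ls.filter pvIsAdd).map pvNorm).countP pvIsComment : Nat) : Int))
        (g + ((((ls.filter pvIsAdd).map pvNorm).countP pvIsTest : Nat) : Int)) := by
  induction ls with
  | nil => intro a b c d e f g; simp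
  | cons l ls ih =>
    intro a b c d e f g
    rw [List.foldl_cons, stepA_mkD]
    by_cases h1 : pvIsAdd l
    · have hd : pvIsDel l = false := not_del_of_add l h1
      simp only [h1, hd, if_true, ih, List.filter_cons, List.map_cons, List.countP_cons,
        List.length_cons, Bool.false_eq_true, if_false, add_zero]
      exact mkD_congr (by push_cast; ring) rfl
        (by split_ifs <;> push_cast <;> ring) (by split_ifs <;> push_cast <;> ring)
        (by split_ifs <;> push_cast <;> ring) (by split_ifs <;> push_cast <;> ring)
        (by split_ifs <;> push_cast <;> ring)
    · by_cases h2 : pvIsDel l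
      · simp only [h1, h2, if_true, if_false, Bool.false_eq_true, ih, List.filter_cons,
          List.countP_cons]
        exact mkD_congr rfl (by push_cast; ring) rfl rfl rfl rfl rfl
      · simp only [h1, h2, if_false, Bool.false_eq_true, ih, List.filter_cons,
          List.countP_cons, add_zero]

-- ===== VERDICT (by name: the statement is the Claim_ definition above) =====
theorem analyze_diff_content_spec : Claim_equal_analyze_diff_content := by
  intro diff _
  show analyze_diff_content diff = analyze_diff_content_alt diff
  simp only [analyze_diff_content, analyze_diff_content_alt]
  have h0 : PySem.Dict.ofList [("additions",(0:Int)),("deletions",0),("function_additions",0),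
      ("class_additions",0),("import_changes",0),("comment_changes",0),("test_changes",0)] =
      mkD 0 0 0 0 0 0 0 := rfl
  rw [h0, foldl_stepA, items_mkD]
  simp only [zero_add, List.length_map]
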